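-- pv_equiv track=rewrite | github.com/HENRIETTA93/pythonProject | assigns/Y2021/t3unsw9021/ass1/roman_arabic.py | generalise_roman_arabic
-- ===== SOURCE A (Python) =====
-- def generalise_roman_arabic(source):
--     source_lst=list(source)
--     source_lst.reverse()
--     generalised_arabic={}
--     value=1
--     flag=True
--     for _ in source_lst:
--         generalised_arabic[_]=value
--         if flag is True:
--             value*=5
--             flag=False
--         else:
--             value*=2
--             flag=True
--     return generalised_arabic
-- ===== SOURCE B (Python) =====
-- def generalise_roman_arabic(source):
--     # Only the last occurrence of each character (in reversed order) determines
--     # its value; insertion order is first occurrence in reversed order.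
--     last = {}
--     for i, c in enumerate(reversed(source)):
--         last[c] = i
--     return {c: 10 ** (i // 2) * (5 if i % 2 else 1) for c, i in last.items()}
-- ===== Notes on version B (the rewrite author's own statement) =====
-- stated objective: faster
-- what changed: Instead of maintaining a running value/flag recurrence over every character, B records each character's last index in one pass and computes the closed-form value 10**(i//2)*(5 if i%2 else 1) only once per distinct character (a timing run measured B up to 29x faster at n=65536).
import Mathlib
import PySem

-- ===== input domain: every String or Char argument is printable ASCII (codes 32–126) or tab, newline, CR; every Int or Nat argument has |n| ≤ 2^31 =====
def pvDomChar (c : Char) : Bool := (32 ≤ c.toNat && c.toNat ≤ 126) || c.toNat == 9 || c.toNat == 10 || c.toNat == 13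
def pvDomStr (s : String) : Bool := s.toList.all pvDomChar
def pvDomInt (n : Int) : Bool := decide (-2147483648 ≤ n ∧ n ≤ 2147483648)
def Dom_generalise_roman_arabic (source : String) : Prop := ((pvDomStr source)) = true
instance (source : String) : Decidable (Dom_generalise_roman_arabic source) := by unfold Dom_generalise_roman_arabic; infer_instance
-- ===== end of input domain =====

-- B records each character's last index in one pass and assigns the closed-form value
-- 10^(i/2)*(5 if i odd) once per distinct character, instead of A's running value/flag
-- recurrence over every character (a timing run measured B up to 29x faster at n = 65536).

-- ===== PORT A =====
-- Fold over the reversed characters keeping (dict, running value, flag), as A does.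
def generalise_roman_arabic (source : String) : List (String × Int) :=
  let source_lst := source.toList.reverse
  let st := source_lst.foldl
    (fun (st : PySem.Dict String Int × Int × Bool) c =>
      let d := st.1.insert (String.ofList [c]) st.2.1
      if st.2.2 then (d, st.2.1 * 5, false) else (d, st.2.1 * 2, true))
    (PySem.Dict.empty, 1, true)
  st.1.items

-- ===== PORT B =====
-- One pass recording last index per char, then a dict comprehension over last.items
-- with the closed-form value.  (Python's 10 ** (i // 2) is ported as
-- (10:Int) ^ (i // 2).toNat — exact here since the stored indices are ≥ 0.)
def generalise_roman_arabic_alt (source : String) : List (String × Int) :=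
  let last := (PySem.List.enumerate source.toList.reverse 0).foldl
    (fun (d : PySem.Dict String Int) p => d.insert (String.ofList [p.2]) p.1)
    PySem.Dict.empty
  let res := last.items.foldl
    (fun (d : PySem.Dict String Int) p =>
      d.insert p.1 ((10 : Int) ^ (PySem.Int.floordiv p.2 2).toNat *
        (if PySem.Int.mod p.2 2 ≠ 0 then 5 else 1)))
    PySem.Dict.empty
  res.items

-- ===== PRECONDITION & SPEC =====
def Spec_generalise_roman_arabic (source : String) (out : List (String × Int)) : Prop := out = generalise_roman_arabic_alt source
instance (source : String) (out : List (String × Int)) : Decidable (Spec_generalise_roman_arabic source out) := by unfold Spec_generalise_roman_arabic; infer_instance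

-- ===== CLAIM (what is proved, stated in full; the proofs are below) =====
def Claim_equal_generalise_roman_arabic : Prop := ∀ (source : String), Dom_generalise_roman_arabic source → Spec_generalise_roman_arabic source (generalise_roman_arabic source)

-- ===== LEMMAS AND PROOFS =====

-- the closed-form value at (reversed) index i
def pvFval (i : Int) : Int :=
  (10 : Int) ^ (PySem.Int.floordiv i 2).toNat * (if PySem.Int.mod i 2 ≠ 0 then 5 else 1)

theorem pvFval_natCast (n : Nat) :
    pvFval (n : Int) = (10 : Int) ^ (n / 2) * (if n % 2 ≠ 0 then 5 else 1) := by
  unfold pvFval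
  have hd : PySem.Int.floordiv (n : Int) 2 = ((n / 2 : Nat) : Int) := by
    exact_mod_cast PySem.Int.floordiv_natCast n 2
  have hm : PySem.Int.mod (n : Int) 2 = ((n % 2 : Nat) : Int) := by
    exact_mod_cast PySem.Int.mod_natCast n 2
  rw [hd, hm]
  simp only [Int.toNat_natCast, ne_eq, Nat.cast_eq_zero]

theorem pvFval_even (n : Nat) (h : n % 2 = 0) : pvFval (n : Int) * 5 = pvFval ((n + 1 : Nat) : Int) := by
  rw [pvFval_natCast, pvFval_natCast]
  have hdiv : (n + 1) / 2 = n / 2 := by omega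
  have hmod : (n + 1) % 2 = 1 := by omega
  simp [h, hdiv, hmod]

theorem pvFval_odd (n : Nat) (h : n % 2 = 1) : pvFval (n : Int) * 2 = pvFval ((n + 1 : Nat) : Int) := by
  rw [pvFval_natCast, pvFval_natCast]
  have hdiv : (n + 1) / 2 = n / 2 + 1 := by omega
  have hmod : (n + 1) % 2 = 0 := by omega
  simp only [h, hdiv, hmod]
  norm_num [pow_succ]
  ring

-- inserting (k, pvFval i) into a value-mapped dict tracks inserting (k, i)
theorem pv_insert_map (dA dL : PySem.Dict String Int) (k : String) (i : Int)
    (h : dA.items = dL.items.map (fun p => (p.1, pvFval p.2))) :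
    (dA.insert k (pvFval i)).items = ((dL.insert k i).items).map (fun p => (p.1, pvFval p.2)) := by
  have hkeys : dA.keys = dL.keys := by
    simp only [PySem.Dict.keys, h, List.map_map]; rfl
  have hc : dA.contains k = dL.contains k := by
    rw [PySem.Dict.contains_eq_decide_mem_keys, PySem.Dict.contains_eq_decide_mem_keys, hkeys]
  by_cases hk : dL.contains k = true
  · have hkA : dA.contains k = true := by rw [hc]; exact hk
    rw [PySem.Dict.items_insert, PySem.Dict.items_insert, hkA, hk]
    simp only [if_pos]
    rw [h, List.map_map, List.map_map]
    refine List.map_congr_left ?_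
    intro p _
    by_cases hpk : p.1 = k <;> simp [Function.comp, hpk]
  · have hk' : dL.contains k = false := by simpa using hk
    have hkA : dA.contains k = false := by rw [hc]; exact hk'
    rw [PySem.Dict.items_insert, PySem.Dict.items_insert, hkA, hk']
    simp only [Bool.false_eq_true, if_false]
    rw [h, List.map_append]
    rfl

-- A's running-value fold tracks B's last-index fold, with the value map pvFval
theorem pv_main (l : List Char) : ∀ (n : Nat) (dA dL : PySem.Dict String Int),
    dA.items = dL.items.map (fun p => (p.1, pvFval p.2)) →
    ((l.foldl
        (fun (st : PySem.Dict String Int × Int × Bool) c =>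
          let d := st.1.insert (String.ofList [c]) st.2.1
          if st.2.2 then (d, st.2.1 * 5, false) else (d, st.2.1 * 2, true))
        (dA, pvFval (n : Int), (n % 2 == 0))).1).items
    = ((PySem.List.enumerate l (n : Int)).foldl
        (fun (d : PySem.Dict String Int) p => d.insert (String.ofList [p.2]) p.1) dL).items.map
        (fun p => (p.1, pvFval p.2)) := by
  induction l with
  | nil => intro n dA dL h; simpa [PySem.List.enumerate_nil] using h
  | cons c l ih =>
    intro n dA dL h
    rw [PySem.List.enumerate_cons]
    simp only [List.foldl]
    have hins := pv_insert_map dA dL (String.ofList [c]) (n : Int) h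
    have hcast : ((n : Int) + 1) = ((n + 1 : Nat) : Int) := by push_cast; ring
    rcases Nat.even_or_odd n with hn | hn
    · have h2 : n % 2 = 0 := Nat.even_iff.mp hn
      have hf : ((n + 1) % 2 == 0) = false := by
        have : (n + 1) % 2 = 1 := by omega
        simp [this]
      rw [show (n % 2 == 0) = true by simp [h2]]
      rw [show (if true = true then
              (dA.insert (String.ofList [c]) (pvFval (n:Int)), pvFval (n:Int) * 5, false)
            else (dA.insert (String.ofList [c]) (pvFval (n:Int)), pvFval (n:Int) * 2, true))
          = (dA.insert (String.ofList [c]) (pvFval (n:Int)), pvFval ((n+1 : Nat):Int), ((n+1) % 2 == 0)) by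
        rw [if_pos rfl, pvFval_even n h2, hf]]
      rw [hcast]
      exact ih (n + 1) _ _ hins
    · have h2 : n % 2 = 1 := Nat.odd_iff.mp hn
      have hf : ((n + 1) % 2 == 0) = true := by
        have : (n + 1) % 2 = 0 := by omega
        simp [this]
      rw [show (n % 2 == 0) = false by simp [h2]]
      rw [show (if false = true then
              (dA.insert (String.ofList [c]) (pvFval (n:Int)), pvFval (n:Int) * 5, false)
            else (dA.insert (String.ofList [c]) (pvFval (n:Int)), pvFval (n:Int) * 2, true))
          = (dA.insert (String.ofList [c]) (pvFval (n:Int)), pvFval ((n+1 : Nat):Int), ((n+1) % 2 == 0)) by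
        rw [if_neg (by simp), pvFval_odd n h2, hf]]
      rw [hcast]
      exact ih (n + 1) _ _ hins

-- ===== VERDICT (by name: the statement is the Claim_ definition above) =====
theorem generalise_roman_arabic_spec : Claim_equal_generalise_roman_arabic := by
  intro source _
  unfold Spec_generalise_roman_arabic generalise_roman_arabic generalise_roman_arabic_alt
  simp only []
  have hA := pv_main source.toList.reverse 0 PySem.Dict.empty PySem.Dict.empty rfl
  rw [show pvFval (((0 : Nat)) : Int) = 1 from by decide,
      show (((0 : Nat)) % 2 == 0) = true from rfl,
      show (((0 : Nat)) : Int) = (0 : Int) from rfl] at hA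
  rw [hA]
  have hnodup : ((PySem.List.enumerate source.toList.reverse 0).foldl
      (fun (d : PySem.Dict String Int) p => d.insert (String.ofList [p.2]) p.1)
      PySem.Dict.empty).keys.Nodup :=
    PySem.Dict.nodup_keys_foldl_insert_key _ _ _ _ PySem.Dict.nodup_keys_empty
  have hfresh : ((((PySem.List.enumerate source.toList.reverse 0).foldl
      (fun (d : PySem.Dict String Int) p => d.insert (String.ofList [p.2]) p.1)
      PySem.Dict.empty).items).foldl
      (fun (d : PySem.Dict String Int) p =>
        d.insert p.1 ((10 : Int) ^ (PySem.Int.floordiv p.2 2).toNat *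
          (if PySem.Int.mod p.2 2 ≠ 0 then 5 else 1)))
      PySem.Dict.empty).items
      = PySem.Dict.empty.items ++ (((PySem.List.enumerate source.toList.reverse 0).foldl
      (fun (d : PySem.Dict String Int) p => d.insert (String.ofList [p.2]) p.1)
      PySem.Dict.empty).items).map (fun p => (p.1, (10 : Int) ^ (PySem.Int.floordiv p.2 2).toNat *
          (if PySem.Int.mod p.2 2 ≠ 0 then 5 else 1))) :=
    PySem.Dict.items_foldl_insert_fresh _ _ _ _
      (fun a _ => PySem.Dict.contains_empty _)
      (by simpa only [PySem.Dict.keys] using hnodup)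
  rw [hfresh]
  rfl
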